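-- pv_equiv track=rewrite | github.com/AatirNadim/data-mining-college | program5/prog.py | merge_func
-- ===== SOURCE A (Python) =====
-- def merge_func(s1 : str, s2 : str) :
--   res = ''
--   for itr in s1 :
--     if itr not in res :
--       res = res + itr
--   for itr in s2 :
--     if itr not in res :
--       res = res + itr
--   return res
--   pass
-- ===== SOURCE B (Python) =====
-- def merge_func(s1: str, s2: str):
--     # Nub by removal: take the first char, delete every later occurrence, recurse.
--     def go(s: str) -> str:
--         if not s:
--             return ''
--         head = s[0]
--         rest = ''.join(c for c in s[1:] if c != head)
--         return head + go(rest)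
--     return go(s1 + s2)
-- ===== Notes on version B (the rewrite author's own statement) =====
-- stated objective: alternative
-- what changed: Replaces A's two accumulate-with-membership-test loops by a recursive nub-by-removal: take the head of s1+s2, filter out all its later occurrences, and recurse on the remainder, so no membership test on a growing result exists.
import Mathlib
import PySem

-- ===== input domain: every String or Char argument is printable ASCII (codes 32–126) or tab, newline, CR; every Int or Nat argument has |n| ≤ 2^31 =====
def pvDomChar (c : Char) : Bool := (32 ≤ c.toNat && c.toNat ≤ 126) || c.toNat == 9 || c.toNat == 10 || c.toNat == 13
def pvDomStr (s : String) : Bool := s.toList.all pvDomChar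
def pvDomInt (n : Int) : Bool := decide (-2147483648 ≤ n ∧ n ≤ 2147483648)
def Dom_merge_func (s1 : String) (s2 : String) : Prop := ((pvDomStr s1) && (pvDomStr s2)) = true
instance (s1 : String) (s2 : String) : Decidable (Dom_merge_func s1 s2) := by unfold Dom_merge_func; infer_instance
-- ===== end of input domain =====

-- B replaces A's accumulate-with-membership loops by a recursive nub-by-removal (alternative decomposition, same cost).

-- ===== PORT A =====
-- A: two loops appending each char not already in the growing result (strings ported as char lists).
def mergeStep (res : List Char) (c : Char) : List Char :=
  if c ∈ res then res else res ++ [c]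

def merge_func (s1 : String) (s2 : String) : String :=
  String.mk ((s2.toList).foldl mergeStep ((s1.toList).foldl mergeStep []))

-- ===== PORT B =====
-- B: go(s) = head + go(tail with every occurrence of head filtered out); applied to s1 + s2.
def goAlt : List Char → List Char
  | [] => []
  | h :: t => h :: goAlt (t.filter (fun c => c ≠ h))
termination_by l => l.length
decreasing_by
  simp only [List.length_cons, Nat.lt_succ_iff, List.length_unattach]
  simpa using List.length_filter_le _ t.attach

def merge_func_alt (s1 : String) (s2 : String) : String :=
  String.mk (goAlt (s1.toList ++ s2.toList))

-- ===== PRECONDITION & SPEC =====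
def Spec_merge_func (s1 : String) (s2 : String) (out : String) : Prop := out = merge_func_alt s1 s2
instance (s1 : String) (s2 : String) (out : String) : Decidable (Spec_merge_func s1 s2 out) := by unfold Spec_merge_func; infer_instance

-- ===== CLAIM =====
def Claim_equal_merge_func : Prop := ∀ (s1 : String) (s2 : String), Dom_merge_func s1 s2 → Spec_merge_func s1 s2 (merge_func s1 s2)

-- ===== LEMMAS AND PROOFS =====
theorem goAlt_nil : goAlt [] = [] := by simp [goAlt]

theorem goAlt_cons (h : Char) (t : List Char) :
    goAlt (h :: t) = h :: goAlt (t.filter (fun c => decide (c ≠ h))) := by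
  simp [goAlt]

theorem step_eq_add (res : List Char) (c : Char) : mergeStep res c = PySem.Set.add res c := by
  simp [mergeStep, PySem.Set.add, PySem.Set.contains]

-- Loop invariant: folding Set.add over s from accumulator acc appends exactly the
-- nub-by-removal of the elements of s not already in acc.
theorem foldl_add_eq_goAlt (s : List Char) : ∀ acc : List Char,
    s.foldl PySem.Set.add acc = acc ++ goAlt (s.filter (fun c => decide (c ∉ acc))) := by
  induction s with
  | nil => intro acc; simp [goAlt_nil]
  | cons c t ih =>
    intro acc
    by_cases hc : c ∈ acc
    · have hadd : PySem.Set.add acc c = acc := by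
        simp [PySem.Set.add, PySem.Set.contains, hc]
      simp only [List.foldl_cons, hadd, List.filter_cons]
      simp [hc, ih acc]
    · have hadd : PySem.Set.add acc c = acc ++ [c] := by
        simp [PySem.Set.add, PySem.Set.contains, hc]
      rw [List.foldl_cons, hadd, ih (acc ++ [c])]
      have hfil : t.filter (fun x => decide (x ∉ acc ++ [c]))
          = (t.filter (fun x => decide (x ∉ acc))).filter (fun x => decide (x ≠ c)) := by
        rw [List.filter_filter]
        apply List.filter_congr
        intro x _
        by_cases h1 : x ∈ acc <;> by_cases h2 : x = c <;> simp [h1, h2]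
      have hcons : (c :: t).filter (fun x => decide (x ∉ acc)) = c :: t.filter (fun x => decide (x ∉ acc)) := by
        simp [hc]
      rw [hcons, goAlt_cons, hfil]
      simp

theorem foldl_add_nil (s : List Char) : s.foldl PySem.Set.add [] = goAlt s := by
  have := foldl_add_eq_goAlt s []
  simpa using this

-- ===== VERDICT =====
theorem merge_func_spec : Claim_equal_merge_func := by
  intro s1 s2 _
  unfold Spec_merge_func merge_func merge_func_alt
  have h : mergeStep = PySem.Set.add := funext fun r => funext (step_eq_add r)
  rw [h, ← List.foldl_append, foldl_add_nil]
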